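-- pv_equiv track=rewrite | github.com/PRajesh999/OwlCoder-Level-1 | vowel_consonat_sequence.py | vowel_consonant_sequence
-- ===== SOURCE A (Python) =====
-- def vowel_consonant_sequence(s):
--     output = []
--     c_c = False
--     c_v = False
--
--     for char in s:
--         if char in 'aeiou':
--             if not c_v:
--                 output.append('V')
--                 c_v = True
--                 c_c = False
--         else:
--             if not c_c:
--                 output.append('C')
--                 c_c = True
--                 c_v = False
--
--     return ''.join(output)
-- ===== SOURCE B (Python) =====
-- def vowel_consonant_sequence(s):
--     # Stage 1: classify every character as 'V' or 'C'.
--     types = ['V' if ch in 'aeiou' else 'C' for ch in s]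
--     # Stage 2: collapse consecutive duplicates.
--     out = []
--     for t in types:
--         if not out or out[-1] != t:
--             out.append(t)
--     return ''.join(out)
-- ===== Notes on version B (the rewrite author's own statement) =====
-- stated objective: idiomatic
-- what changed: Replaced the two-boolean run-detecting state machine with a two-stage classify-then-collapse computation: map each char to 'V'/'C', then drop each element equal to the previous one.
import Mathlib
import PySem

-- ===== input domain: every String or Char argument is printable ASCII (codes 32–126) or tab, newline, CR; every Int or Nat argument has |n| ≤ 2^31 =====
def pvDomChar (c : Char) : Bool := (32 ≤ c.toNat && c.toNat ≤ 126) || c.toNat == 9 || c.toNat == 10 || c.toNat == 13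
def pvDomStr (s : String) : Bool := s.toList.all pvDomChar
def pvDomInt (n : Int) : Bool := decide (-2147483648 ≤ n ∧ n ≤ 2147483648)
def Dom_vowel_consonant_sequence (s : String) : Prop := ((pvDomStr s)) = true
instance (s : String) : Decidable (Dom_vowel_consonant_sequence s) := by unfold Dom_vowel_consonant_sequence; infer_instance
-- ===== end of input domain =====

-- B replaces A's two-boolean state machine with a classify-then-collapse two-stage pass (idiomatic; same cost).

-- ===== PORT A =====
-- literal port of A's loop: output list, c_c/c_v booleans, branches in source order
def vcsLoopA : List Char → List Char → Bool → Bool → List Char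
  | [], out, _, _ => out
  | c :: rest, out, c_c, c_v =>
    if c ∈ ['a', 'e', 'i', 'o', 'u'] then
      if !c_v then vcsLoopA rest (out ++ ['V']) false true
      else vcsLoopA rest out c_c c_v
    else
      if !c_c then vcsLoopA rest (out ++ ['C']) true false
      else vcsLoopA rest out c_c c_v

def vowel_consonant_sequence (s : String) : String :=
  String.ofList (vcsLoopA s.toList [] false false)

-- ===== PORT B =====
-- stage 1 of Source B: classify each char
def vcsClassify (c : Char) : Char := if c ∈ ['a', 'e', 'i', 'o', 'u'] then 'V' else 'C'

-- stage 2 of Source B: keep t only if out is empty or out[-1] ≠ t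
def vcsStep (out : List Char) (t : Char) : List Char :=
  if out = [] ∨ out.getLast? ≠ some t then out ++ [t] else out

def vowel_consonant_sequence_alt (s : String) : String :=
  String.ofList ((s.toList.map vcsClassify).foldl vcsStep [])

-- ===== PRECONDITION & SPEC =====
def Spec_vowel_consonant_sequence (s : String) (out : String) : Prop := out = vowel_consonant_sequence_alt s
instance (s : String) (out : String) : Decidable (Spec_vowel_consonant_sequence s out) := by unfold Spec_vowel_consonant_sequence; infer_instance

-- ===== CLAIM (what is proved, stated in full; the proofs are below) =====
def Claim_equal_vowel_consonant_sequence : Prop := ∀ (s : String), Dom_vowel_consonant_sequence s → Spec_vowel_consonant_sequence s (vowel_consonant_sequence s)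

-- ===== LEMMAS AND PROOFS =====

-- reference function: collapse consecutive duplicate types, given the previously emitted type
def vcsRef : List Char → Option Char → List Char
  | [], _ => []
  | c :: rest, prev =>
    let t := vcsClassify c
    if prev = some t then vcsRef rest prev else t :: vcsRef rest (some t)

lemma vcsLoopA_ref : ∀ (cs out : List Char),
    vcsLoopA cs out false false = out ++ vcsRef cs none ∧
    vcsLoopA cs out true false = out ++ vcsRef cs (some 'C') ∧
    vcsLoopA cs out false true = out ++ vcsRef cs (some 'V') := by
  intro cs
  induction cs with
  | nil => intro out; simp [vcsLoopA, vcsRef]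
  | cons c rest ih =>
    intro out
    by_cases h : c ∈ ['a', 'e', 'i', 'o', 'u'] <;>
      simp [vcsLoopA, vcsRef, vcsClassify, h, (ih _).2.1, (ih _).2.2]

-- dedup over the mapped list, given the previous type
def vcsRefT : List Char → Option Char → List Char
  | [], _ => []
  | t :: rest, prev =>
    if prev = some t then vcsRefT rest prev else t :: vcsRefT rest (some t)

lemma vcsRef_eq_refT : ∀ (cs : List Char) (p : Option Char),
    vcsRef cs p = vcsRefT (cs.map vcsClassify) p := by
  intro cs
  induction cs with
  | nil => intro p; simp [vcsRef, vcsRefT]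
  | cons c rest ih =>
    intro p
    simp only [vcsRef, List.map_cons, vcsRefT]
    split <;> simp [ih]

lemma vcsStep_cond (out : List Char) (t : Char) :
    vcsStep out t = if out.getLast? = some t then out else out ++ [t] := by
  cases h : out.getLast? with
  | none =>
    have : out = [] := by cases out <;> simp_all [List.getLast?_eq_none_iff]
    simp [vcsStep, this]
  | some x =>
    have hne : out ≠ [] := by intro h0; simp [h0] at h
    by_cases hx : x = t <;> simp [vcsStep, h, hx, hne]

lemma vcsFoldB_ref : ∀ (ts out : List Char),
    List.foldl vcsStep out ts = out ++ vcsRefT ts out.getLast? := by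
  intro ts
  induction ts with
  | nil => intro out; simp [vcsRefT]
  | cons t rest ih =>
    intro out
    rw [List.foldl_cons, vcsStep_cond]
    by_cases h : out.getLast? = some t
    · simp [h, ih, vcsRefT]
    · simp [h, ih, vcsRefT, List.getLast?_append]

-- ===== VERDICT (by name: the statement is the Claim_ definition above) =====
theorem vowel_consonant_sequence_spec : Claim_equal_vowel_consonant_sequence := by
  intro s _
  unfold Spec_vowel_consonant_sequence vowel_consonant_sequence vowel_consonant_sequence_alt
  rw [(vcsLoopA_ref s.toList []).1, vcsFoldB_ref, vcsRef_eq_refT]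
  rfl
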